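-- pv_equiv track=rewrite | github.com/rahulptel/morbdd | code/python/morbdd/eval_mis.py | get_pareto_states_per_layer
-- ===== SOURCE A (Python) =====
-- def get_pareto_states_per_layer(n_vars, lids, preds):
--     pareto_states_per_layer = {}
--     prev_lid, counter = int(lids[0]), 0
--     for lid, is_pareto in zip(lids[:20], preds[:20]):
--         lid = int(lid)
--
--         if prev_lid != lid:
--             counter = 0
--             prev_lid = lid
--
--         if lid not in pareto_states_per_layer:
--             pareto_states_per_layer[lid] = []
--         if is_pareto > 0:
--             pareto_states_per_layer[lid].append(counter)
--         counter += 1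
--
--     pareto_states_per_layer_lst = []
--     layers = list(pareto_states_per_layer.keys())
--     for lid in range(n_vars):
--         if lid in layers:
--             pareto_states_per_layer_lst.append(pareto_states_per_layer[lid])
--         else:
--             pareto_states_per_layer_lst.append([])
--
--     return pareto_states_per_layer_lst
-- ===== SOURCE B (Python) =====
-- def _runs(pairs):
--     # split into maximal runs of pairs sharing the same first component
--     if not pairs:
--         return []
--     head = pairs[0][0]
--     k = 1
--     while k < len(pairs) and pairs[k][0] == head:
--         k += 1
--     return [pairs[:k]] + _runs(pairs[k:])
--
--
-- def get_pareto_states_per_layer(n_vars, lids, preds):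
--     d = {}
--     for run in _runs(list(zip(lids[:20], preds[:20]))):
--         key = int(run[0][0])
--         d.setdefault(key, []).extend(i for i, (_, p) in enumerate(run) if p > 0)
--     return [d.get(lid, []) for lid in range(n_vars)]
-- ===== Notes on version B (the rewrite author's own statement) =====
-- stated objective: alternative
-- what changed: Replaces A's prev_lid/counter state machine and final keys-membership loop by an explicit run-segmentation of the zipped 20-element prefix (maximal runs of equal layer id), a per-run enumerate collecting pareto indices, and a map over range(n_vars) with dict.get.
-- outside the precondition, e.g. on get_pareto_states_per_layer(2, [], [1]): A raises IndexError, B returns [[], []]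
import Mathlib
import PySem

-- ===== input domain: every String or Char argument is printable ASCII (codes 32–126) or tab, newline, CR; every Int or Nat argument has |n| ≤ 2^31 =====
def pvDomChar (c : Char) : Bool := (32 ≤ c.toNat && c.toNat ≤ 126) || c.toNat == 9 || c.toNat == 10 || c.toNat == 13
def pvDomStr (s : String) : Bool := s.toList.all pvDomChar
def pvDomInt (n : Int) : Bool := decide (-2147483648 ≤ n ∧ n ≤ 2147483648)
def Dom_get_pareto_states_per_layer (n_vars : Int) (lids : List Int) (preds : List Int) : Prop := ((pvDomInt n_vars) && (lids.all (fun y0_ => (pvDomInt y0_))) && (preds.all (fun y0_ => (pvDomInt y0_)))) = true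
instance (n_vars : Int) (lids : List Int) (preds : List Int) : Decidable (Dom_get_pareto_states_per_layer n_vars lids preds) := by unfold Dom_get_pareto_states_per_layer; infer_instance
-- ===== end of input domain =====

-- B replaces A's prev_lid/counter state machine by an explicit run-segmentation of the
-- zipped prefix (maximal runs of equal layer id) and a per-run enumerate; objective: alternative decomposition.

-- ===== PORT A =====
-- loop body of A: state is (dict, prev_lid, counter); int(lid) is the identity on Int inputs
def pvAstep (st : PySem.Dict Int (List Int) × Int × Int) (p : Int × Int) :
    PySem.Dict Int (List Int) × Int × Int :=
  let lid := p.1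
  let pc := if st.2.1 ≠ lid then (lid, (0 : Int)) else (st.2.1, st.2.2)
  let d1 := if st.1.contains lid then st.1 else st.1.insert lid ([] : List Int)
  let d2 := if p.2 > 0 then d1.modify lid [] (fun v => v ++ [pc.2]) else d1
  (d2, pc.1, pc.2 + 1)

def get_pareto_states_per_layer (n_vars : Int) (lids : List Int) (preds : List Int) : List (List Int) :=
  -- prev_lid = int(lids[0]); Python raises IndexError on empty lids (excluded by Pre_), pyGetD defaults there
  let prev0 := PySem.List.pyGetD lids 0 0
  let st := (List.zip (PySem.List.slice lids none (some 20)) (PySem.List.slice preds none (some 20))).foldl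
      pvAstep (PySem.Dict.empty, prev0, 0)
  let d := st.1
  let layers := d.keys
  -- d[lid] is guarded by 'lid in layers', so getD with default [] is exact
  (PySem.List.pyRange 0 n_vars 1).foldl
    (fun acc lid => acc ++ [if lid ∈ layers then d.getD lid [] else []]) []

-- ===== PORT B =====
-- _runs of Source B: maximal runs of pairs sharing the same first component (the while scan is takeWhile/dropWhile)
def pvRuns : List (Int × Int) → List (List (Int × Int))
  | [] => []
  | h :: t =>
    (h :: t.takeWhile (fun q => q.1 == h.1)) :: pvRuns (t.dropWhile (fun q => q.1 == h.1))
termination_by l => l.length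
decreasing_by
  simp only [List.length_cons]
  exact Nat.lt_succ_of_le (List.length_dropWhile_le _ _)

-- [i for i, (_, p) in enumerate(run, s) if p > 0] (Source B uses s = 0)
def pvParetoIdx (run : List (Int × Int)) (s : Int) : List Int :=
  (PySem.List.enumerate run s).filterMap (fun ip => if ip.2.2 > 0 then some ip.1 else none)

-- loop body of Source B: d.setdefault(key, []).extend(…)
def pvBstep (d : PySem.Dict Int (List Int)) (run : List (Int × Int)) : PySem.Dict Int (List Int) :=
  let key := (run.headD (0, 0)).1
  d.insert key (d.getD key [] ++ pvParetoIdx run 0)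

def get_pareto_states_per_layer_alt (n_vars : Int) (lids : List Int) (preds : List Int) : List (List Int) :=
  let d := (pvRuns (List.zip (PySem.List.slice lids none (some 20))
      (PySem.List.slice preds none (some 20)))).foldl pvBstep PySem.Dict.empty
  (PySem.List.pyRange 0 n_vars 1).map (fun lid => d.getD lid [])

-- ===== PRECONDITION & SPEC =====
-- A evaluates lids[0] first, so it raises IndexError exactly when lids is empty; Pre_ excludes that.
def Pre_get_pareto_states_per_layer (n_vars : Int) (lids : List Int) (preds : List Int) : Prop :=
  lids ≠ []
instance (n_vars : Int) (lids : List Int) (preds : List Int) : Decidable (Pre_get_pareto_states_per_layer n_vars lids preds) := by unfold Pre_get_pareto_states_per_layer; infer_instance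

def pvWitness_get_pareto_states_per_layer : Int × List Int × List Int := (3, [0, 0, 1], [1, 0, 1])

def Spec_get_pareto_states_per_layer (n_vars : Int) (lids : List Int) (preds : List Int) (out : List (List Int)) : Prop := out = get_pareto_states_per_layer_alt n_vars lids preds
instance (n_vars : Int) (lids : List Int) (preds : List Int) (out : List (List Int)) : Decidable (Spec_get_pareto_states_per_layer n_vars lids preds out) := by unfold Spec_get_pareto_states_per_layer; infer_instance

-- ===== CLAIM (what is proved, stated in full; the proofs are below) =====
def Claim_equal_get_pareto_states_per_layer : Prop := ∀ (n_vars : Int) (lids : List Int) (preds : List Int), Dom_get_pareto_states_per_layer n_vars lids preds → Pre_get_pareto_states_per_layer n_vars lids preds → Spec_get_pareto_states_per_layer n_vars lids preds (get_pareto_states_per_layer n_vars lids preds)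


-- ===== LEMMAS AND PROOFS =====

theorem pvModify_eq_insert {ν : Type} (d : PySem.Dict Int ν) (k : Int) (d0 : ν) (f : ν → ν) :
    d.modify k d0 f = d.insert k (f (d.getD k d0)) := rfl

theorem pvInsert_getD_self (d : PySem.Dict Int (List Int)) (k : Int)
    (hc : d.contains k = true) (hnd : d.keys.Nodup) :
    d.insert k (d.getD k []) = d := by
  apply PySem.Dict.ext
  rw [PySem.Dict.items_insert_of_contains _ _ hc]
  conv_rhs => rw [← List.map_id d.items]
  apply List.map_congr_left
  intro p hp
  by_cases hpk : p.1 = k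
  · have hmem : (k, p.2) ∈ d.items := by rwa [← hpk]
    have := PySem.Dict.getD_of_mem_items d hmem hnd ([] : List Int)
    simp [hpk, this]
    exact ((Prod.ext_iff.mpr ⟨hpk.symm, rfl⟩ : (k, p.2) = p)).symm ▸ rfl
  · simp [hpk]

theorem pvParetoIdx_nil (s : Int) : pvParetoIdx [] s = [] := by
  simp [pvParetoIdx, PySem.List.enumerate_nil]

theorem pvParetoIdx_cons (p : Int × Int) (r : List (Int × Int)) (s : Int) :
    pvParetoIdx (p :: r) s = (if p.2 > 0 then [s] else []) ++ pvParetoIdx r (s + 1) := by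
  simp only [pvParetoIdx, PySem.List.enumerate_cons, List.filterMap_cons]
  split_ifs <;> simp_all

theorem pvRunA (r : List (Int × Int)) (k : Int) (d : PySem.Dict Int (List Int)) (c : Int)
    (hall : ∀ p ∈ r, p.1 = k) (hc : d.contains k = true) (hnd : d.keys.Nodup) :
    r.foldl pvAstep (d, k, c) = (d.insert k (d.getD k [] ++ pvParetoIdx r c), k, c + r.length) := by
  induction r generalizing d c with
  | nil =>
    simp [pvParetoIdx_nil, pvInsert_getD_self d k hc hnd]
  | cons p rest ih =>
    have hpk : p.1 = k := hall p (by simp)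
    have hstep : pvAstep (d, k, c) p =
        ((if p.2 > 0 then d.insert k (d.getD k [] ++ [c]) else d), k, c + 1) := by
      simp [pvAstep, hpk, hc, pvModify_eq_insert]
    rw [List.foldl_cons, hstep]
    have hall' : ∀ q ∈ rest, q.1 = k := fun q hq => hall q (by simp [hq])
    by_cases hp : p.2 > 0
    · rw [if_pos hp]
      rw [ih _ (c + 1) hall' (PySem.Dict.contains_insert_self d k _) (PySem.Dict.nodup_keys_insert d k _ hnd)]
      rw [PySem.Dict.insert_insert_self, PySem.Dict.getD_insert_self, pvParetoIdx_cons, if_pos hp]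
      refine Prod.ext ?_ (Prod.ext rfl ?_)
      · simp [List.append_assoc]
      · simp; push_cast; ring
    · rw [if_neg hp]
      rw [ih _ (c + 1) hall' hc hnd, pvParetoIdx_cons, if_neg hp]
      refine Prod.ext rfl (Prod.ext rfl ?_)
      simp; push_cast; ring

theorem pvMainA : ∀ (ps : List (Int × Int)) (d : PySem.Dict Int (List Int)) (prev c : Int),
    d.keys.Nodup → (c = 0 ∨ ∀ p ∈ ps.head?, prev ≠ p.1) →
    (ps.foldl pvAstep (d, prev, c)).1 = (pvRuns ps).foldl pvBstep d
  | [], d, prev, c, _, _ => by simp [pvRuns]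
  | h :: t, d, prev, c, hnd, hinv => by
    have hfirst : pvAstep (d, prev, c) h = pvAstep (d, h.1, 0) h := by
      by_cases hpv : prev = h.1
      · have hc0 : c = 0 := by
          rcases hinv with h0 | hni
          · exact h0
          · exact absurd hpv (hni h (by simp))
        simp [pvAstep, hpv, hc0]
      · simp [pvAstep, hpv]
    have htw : ∀ p ∈ t.takeWhile (fun q => q.1 == h.1), p.1 = h.1 := by
      intro p hp
      simpa using List.mem_takeWhile_imp hp
    -- one explicit step on h, then pvRunA on the rest of the run
    have hd1c : (if d.contains h.1 then d else d.insert h.1 ([] : List Int)).contains h.1 = true := by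
      by_cases hcd : d.contains h.1 <;> simp [hcd, PySem.Dict.contains_insert_self]
    have hd1n : (if d.contains h.1 then d else d.insert h.1 ([] : List Int)).keys.Nodup := by
      by_cases hcd : d.contains h.1 <;> simp [hcd, PySem.Dict.nodup_keys_insert _ _ _ hnd, hnd]
    have hstep1 : pvAstep (d, h.1, 0) h =
        ((if h.2 > 0
            then (if d.contains h.1 then d else d.insert h.1 ([] : List Int)).insert h.1
              ((if d.contains h.1 then d else d.insert h.1 ([] : List Int)).getD h.1 [] ++ [(0 : Int)])
            else (if d.contains h.1 then d else d.insert h.1 ([] : List Int))), h.1, 1) := by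
      by_cases hpp : h.2 > 0 <;> simp [pvAstep, hpp, pvModify_eq_insert]
    have hDc : (if h.2 > 0
            then (if d.contains h.1 then d else d.insert h.1 ([] : List Int)).insert h.1
              ((if d.contains h.1 then d else d.insert h.1 ([] : List Int)).getD h.1 [] ++ [(0 : Int)])
            else (if d.contains h.1 then d else d.insert h.1 ([] : List Int))).contains h.1 = true := by
      by_cases hpp : h.2 > 0 <;> simp [hpp, PySem.Dict.contains_insert_self, hd1c]
    have hDn : (if h.2 > 0
            then (if d.contains h.1 then d else d.insert h.1 ([] : List Int)).insert h.1
              ((if d.contains h.1 then d else d.insert h.1 ([] : List Int)).getD h.1 [] ++ [(0 : Int)])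
            else (if d.contains h.1 then d else d.insert h.1 ([] : List Int))).keys.Nodup := by
      by_cases hpp : h.2 > 0 <;> simp [hpp, PySem.Dict.nodup_keys_insert _ _ _ hd1n, hd1n]
    have hsplit : h :: t = (h :: t.takeWhile (fun q => q.1 == h.1)) ++ t.dropWhile (fun q => q.1 == h.1) := by
      rw [List.cons_append, List.takeWhile_append_dropWhile]
    -- the dict after the whole run equals B's single run step
    have hDfin : (if h.2 > 0
            then (if d.contains h.1 then d else d.insert h.1 ([] : List Int)).insert h.1
              ((if d.contains h.1 then d else d.insert h.1 ([] : List Int)).getD h.1 [] ++ [(0 : Int)])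
            else (if d.contains h.1 then d else d.insert h.1 ([] : List Int))).insert h.1
          ((if h.2 > 0
            then (if d.contains h.1 then d else d.insert h.1 ([] : List Int)).insert h.1
              ((if d.contains h.1 then d else d.insert h.1 ([] : List Int)).getD h.1 [] ++ [(0 : Int)])
            else (if d.contains h.1 then d else d.insert h.1 ([] : List Int))).getD h.1 []
            ++ pvParetoIdx (t.takeWhile (fun q => q.1 == h.1)) 1)
        = d.insert h.1 (d.getD h.1 [] ++ pvParetoIdx (h :: t.takeWhile (fun q => q.1 == h.1)) 0) := by
      rw [pvParetoIdx_cons]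
      by_cases hcd : d.contains h.1 <;> by_cases hpp : h.2 > 0
      · simp [hcd, hpp, PySem.Dict.getD_insert_self, PySem.Dict.insert_insert_self,
          List.append_assoc]
      · simp [hcd, hpp]
      · have hf : d.contains h.1 = false := by simpa using hcd
        rw [PySem.Dict.getD_of_not_contains d _ hf]
        simp [hcd, hpp, PySem.Dict.getD_insert_self, PySem.Dict.insert_insert_self]
      · have hf : d.contains h.1 = false := by simpa using hcd
        rw [PySem.Dict.getD_of_not_contains d _ hf]
        simp [hcd, hpp, PySem.Dict.getD_insert_self, PySem.Dict.insert_insert_self]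
    have hinv' : (1 + ((t.takeWhile (fun q => q.1 == h.1)).length : Int) = 0) ∨
        ∀ p ∈ (t.dropWhile (fun q => q.1 == h.1)).head?, h.1 ≠ p.1 := by
      right
      intro p hp
      cases heq : t.dropWhile (fun q : Int × Int => q.1 == h.1) with
      | nil => rw [heq] at hp; simp at hp
      | cons a as =>
        rw [heq] at hp
        simp only [List.head?_cons, Option.mem_some_iff] at hp
        have hw : t.dropWhile (fun q : Int × Int => q.1 == h.1) ≠ [] := by simp [heq]
        have := List.head_dropWhile_not (fun q : Int × Int => q.1 == h.1) hw
        simp only [heq, List.head_cons] at this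
        subst hp
        simp at this
        omega
    calc ((h :: t).foldl pvAstep (d, prev, c)).1
        = ((t.dropWhile (fun q => q.1 == h.1)).foldl pvAstep
            ((h :: t.takeWhile (fun q => q.1 == h.1)).foldl pvAstep (d, h.1, 0))).1 := by
          conv_lhs => rw [hsplit, List.foldl_append, List.foldl_cons, hfirst, ← List.foldl_cons]
      _ = (pvRuns (t.dropWhile (fun q => q.1 == h.1))).foldl pvBstep
            (d.insert h.1 (d.getD h.1 [] ++ pvParetoIdx (h :: t.takeWhile (fun q => q.1 == h.1)) 0)) := by
          rw [List.foldl_cons, hstep1,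
            pvRunA (t.takeWhile (fun q => q.1 == h.1)) h.1 _ 1 htw hDc hDn, hDfin]
          exact pvMainA (t.dropWhile (fun q => q.1 == h.1)) _ h.1 _
            (PySem.Dict.nodup_keys_insert _ _ _ hnd) hinv'
      _ = (pvRuns (h :: t)).foldl pvBstep d := by
          rw [pvRuns]
          rw [List.foldl_cons]
          rfl
termination_by ps => ps.length
decreasing_by
  simp only [List.length_cons]
  exact Nat.lt_succ_of_le (List.length_dropWhile_le _ _)

theorem pvFoldl_append_map {α β : Type} (l : List α) (g : α → β) (acc : List β) :
    l.foldl (fun a x => a ++ [g x]) acc = acc ++ l.map g := by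
  induction l generalizing acc <;> simp [*]

-- ===== VERDICT (by name: the statement is the Claim_ definition above) =====
theorem get_pareto_states_per_layer_spec : Claim_equal_get_pareto_states_per_layer := by
  intro n_vars lids preds _ _
  unfold Spec_get_pareto_states_per_layer get_pareto_states_per_layer get_pareto_states_per_layer_alt
  have hd := pvMainA
      (List.zip (PySem.List.slice lids none (some 20)) (PySem.List.slice preds none (some 20)))
      PySem.Dict.empty (PySem.List.pyGetD lids 0 0) 0 PySem.Dict.nodup_keys_empty (Or.inl rfl)
  simp only [pvFoldl_append_map, List.nil_append, hd]
  apply List.map_congr_left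
  intro lid _
  set db := (pvRuns (List.zip (PySem.List.slice lids none (some 20))
      (PySem.List.slice preds none (some 20)))).foldl pvBstep PySem.Dict.empty with hdb
  by_cases hm : lid ∈ db.keys
  · simp [hm]
  · have hc : db.contains lid = false := by
      have := (PySem.Dict.contains_iff_mem_keys db lid).not
      simp only [Bool.not_eq_true] at this
      exact this.mpr hm
    simp [hm, PySem.Dict.getD_of_not_contains db _ hc]
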